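-- pv_equiv track=rewrite | github.com/vicre/api.security.ait.dtu.dk | backend/myview/views.py | _extract_common_name
-- ===== SOURCE A (Python) =====
-- def _extract_common_name(distinguished_name):
--     if not distinguished_name:
--         return None
--
--     for component in str(distinguished_name).split(","):
--         component = component.strip()
--         if component.upper().startswith("CN="):
--             return component[3:]
--
--     return str(distinguished_name)
-- ===== SOURCE B (Python) =====
-- def _extract_common_name(distinguished_name):
--     # Single left-to-right character scan: at each component start skip
--     # whitespace, test for a case-insensitive "CN=" tag, and slice the value
--     # out of the original string; no split() list is ever built.
--     if not distinguished_name: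
--         return None
--     s = str(distinguished_name)
--     n = len(s)
--     ws = " \t\n\r\x0b\x0c"
--     i = 0
--     while True:
--         j = i
--         while j < n and s[j] in ws:
--             j += 1
--         if s[j:j + 3].upper() == "CN=":
--             k = j + 3
--             while k < n and s[k] != ",":
--                 k += 1
--             end = k
--             while end > j + 3 and s[end - 1] in ws:
--                 end -= 1
--             return s[j + 3:end]
--         while i < n and s[i] != ",":
--             i += 1
--         if i == n:
--             return s
--         i += 1
-- ===== Notes on version B (the rewrite author's own statement) =====
-- stated objective: alternative
-- what changed: A splits the string into a list of components and strips each one; B makes a single left-to-right index scan over the original string (skip whitespace at each component start, test the CN tag case-insensitively, slice the value out directly), never materialising a component list.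
import Mathlib
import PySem

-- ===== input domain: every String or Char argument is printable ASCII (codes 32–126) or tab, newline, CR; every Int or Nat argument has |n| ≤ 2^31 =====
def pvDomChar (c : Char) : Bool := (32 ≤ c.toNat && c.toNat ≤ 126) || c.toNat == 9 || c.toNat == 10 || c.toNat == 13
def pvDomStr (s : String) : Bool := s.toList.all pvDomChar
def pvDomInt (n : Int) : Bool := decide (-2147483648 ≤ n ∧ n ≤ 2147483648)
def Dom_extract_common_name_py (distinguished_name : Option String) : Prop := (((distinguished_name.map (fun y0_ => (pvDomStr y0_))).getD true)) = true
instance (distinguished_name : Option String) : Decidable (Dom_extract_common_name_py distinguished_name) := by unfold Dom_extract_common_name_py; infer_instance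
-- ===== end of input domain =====

-- B replaces A's split(",")/strip loop by a single left-to-right character scan that slices the
-- CN value straight out of the original string; no list of components is built (objective: alternative).

-- ===== PORT A =====
-- the for-loop over str(dn).split(","): first component whose strip() starts with "CN=" (case-insensitive)
def extract_common_name_py_loop : List (List Char) → Option (List Char)
  | [] => none
  | comp :: rest =>
    let c := PySem.Chars.strip comp
    if PySem.Chars.startswith (PySem.Chars.upper c) ['C', 'N', '='] then
      some (PySem.Chars.slice c (some 3) none)          -- component[3:]
    else extract_common_name_py_loop rest

def extract_common_name_py (distinguished_name : Option String) : Option String :=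
  match distinguished_name with
  | none => none
  | some s =>
    if s = "" then none                                  -- `if not distinguished_name`
    else
      match extract_common_name_py_loop (PySem.Chars.splitOn s.toList [',']) with
      | some v => some (String.ofList v)
      | none => some s                                   -- fallback: return str(dn)

-- ===== PORT B =====
-- membership in the whitespace set " \t\n\r\x0b\x0c" of Source B
def pvIsWsB (c : Char) : Bool :=
  c == ' ' || c == '\t' || c == '\n' || c == '\r' || c == Char.ofNat 11 || c == Char.ofNat 12
-- the `while end > j+3 and s[end-1] in ws: end -= 1` right-trim of Source B
def pvRstripB (l : List Char) : List Char := (l.reverse.dropWhile pvIsWsB).reverse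

-- the outer `while True` scan of Source B: skip whitespace, test "CN=", else jump past the next comma
def extract_common_name_py_scan (l : List Char) : Option (List Char) :=
  let rest := l.dropWhile pvIsWsB                              -- j := skip whitespace from i
  if PySem.Chars.upper (rest.take 3) = ['C', 'N', '='] then    -- s[j:j+3].upper() == "CN="
    some (pvRstripB ((rest.drop 3).takeWhile (fun c => c ≠ ',')))  -- s[j+3:end]
  else
    let d := l.dropWhile (fun c => c ≠ ',')                    -- advance i to the next comma
    if hd : d.isEmpty then none                                -- i == n: return s (no CN found)
    else extract_common_name_py_scan d.tail                    -- i += 1, next component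
termination_by l.length
decreasing_by
  have hle := List.length_dropWhile_le (fun c => decide (c ≠ ',')) l
  simp only [List.isEmpty_iff] at hd
  have : 0 < (l.dropWhile (fun c => decide (c ≠ ','))).length := List.length_pos_iff.mpr hd
  simp only [List.length_tail]
  omega

def extract_common_name_py_alt (distinguished_name : Option String) : Option String :=
  match distinguished_name with
  | none => none
  | some s =>
    if s = "" then none
    else
      match extract_common_name_py_scan s.toList with
      | some v => some (String.ofList v)
      | none => some s

-- ===== PRECONDITION & SPEC =====
def Spec_extract_common_name_py (distinguished_name : Option String) (out : Option String) : Prop := out = extract_common_name_py_alt distinguished_name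
instance (distinguished_name : Option String) (out : Option String) : Decidable (Spec_extract_common_name_py distinguished_name out) := by unfold Spec_extract_common_name_py; infer_instance

-- ===== CLAIM (what is proved, stated in full; the proofs are below) =====
def Claim_equal_extract_common_name_py : Prop := ∀ (distinguished_name : Option String), Dom_extract_common_name_py distinguished_name → Spec_extract_common_name_py distinguished_name (extract_common_name_py distinguished_name)

-- ===== LEMMAS AND PROOFS =====

-- recursive description of str.split(",")
def pvSplitC : List Char → List (List Char)
  | [] => [[]]
  | c :: t => if c = ',' then [] :: pvSplitC t else
    match pvSplitC t with
    | [] => [[c]]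
    | h :: m => (c :: h) :: m

theorem pvSplitC_ne_nil (l : List Char) : pvSplitC l ≠ [] := by
  cases l with
  | nil => simp [pvSplitC]
  | cons c t =>
    simp only [pvSplitC]
    split_ifs
    · simp
    · cases pvSplitC t <;> simp

def pvConsHead (p : List Char) : List (List Char) → List (List Char)
  | [] => [p]
  | h :: t => (p ++ h) :: t

theorem pvSplitC_cons_ne (c : Char) (t : List Char) (hc : c ≠ ',') :
    pvSplitC (c :: t) = pvConsHead [c] (pvSplitC t) := by
  simp only [pvSplitC, hc, if_false]
  cases pvSplitC t <;> simp [pvConsHead]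

theorem pvConsHead_consHead (p q : List Char) (m : List (List Char)) :
    pvConsHead p (pvConsHead q m) = pvConsHead (p ++ q) m := by
  cases m <;> simp [pvConsHead]

theorem pvSplitC_go (fuel : Nat) : ∀ (l cur : List Char) (acc : List (List Char)),
    l.length ≤ fuel →
    PySem.Chars.splitOn.go [','] fuel l cur acc = acc.reverse ++ pvConsHead cur.reverse (pvSplitC l) := by
  induction fuel with
  | zero =>
    intro l cur acc hl
    have : l = [] := by cases l <;> simp_all
    subst this
    simp [PySem.Chars.splitOn.go, pvSplitC, pvConsHead]
  | succ n ih =>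
    intro l cur acc hl
    cases l with
    | nil => simp [PySem.Chars.splitOn.go, pvSplitC, pvConsHead]
    | cons c rest =>
      by_cases hc : c = ','
      · subst hc
        have hpre : List.isPrefixOf [','] (',' :: rest) = true := by simp [List.isPrefixOf]
        rw [show PySem.Chars.splitOn.go [','] (n+1) (',' :: rest) cur acc
              = PySem.Chars.splitOn.go [','] n rest [] (cur.reverse :: acc) by
            simp [PySem.Chars.splitOn.go, hpre]]
        rw [ih rest [] (cur.reverse :: acc) (by simp at hl; omega)]
        rw [show pvSplitC (',' :: rest) = [] :: pvSplitC rest by simp [pvSplitC]]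
        cases hm : pvSplitC rest with
        | nil => exact absurd hm (pvSplitC_ne_nil rest)
        | cons mh mt => simp [pvConsHead]
      · have hpre : List.isPrefixOf [','] (c :: rest) = false := by
          simp [List.isPrefixOf]; exact fun h => hc h.symm
        rw [show PySem.Chars.splitOn.go [','] (n+1) (c :: rest) cur acc
              = PySem.Chars.splitOn.go [','] n rest (c :: cur) acc by
            simp [PySem.Chars.splitOn.go, hpre]]
        rw [ih rest (c :: cur) acc (by simp at hl; omega)]
        rw [pvSplitC_cons_ne c rest hc, pvConsHead_consHead]
        simp

theorem splitOn_comma (l : List Char) : PySem.Chars.splitOn l [','] = pvSplitC l := by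
  rw [PySem.Chars.splitOn, pvSplitC_go (l.length + 1) l [] [] (by omega)]
  cases hm : pvSplitC l with
  | nil => exact absurd hm (pvSplitC_ne_nil l)
  | cons mh mt => simp [pvConsHead]

-- head/tail characterisation of pvSplitC
def pvTail : List Char → List (List Char)
  | [] => []
  | _ :: t => pvSplitC t

theorem pvSplitC_eq (l : List Char) :
    pvSplitC l = l.takeWhile (fun c => c ≠ ',') :: pvTail (l.dropWhile (fun c => c ≠ ',')) := by
  induction l with
  | nil => simp [pvSplitC, pvTail]
  | cons c t ih =>
    by_cases hc : c = ','
    · subst hc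
      simp [pvSplitC, pvTail]
    · rw [pvSplitC_cons_ne c t hc, ih]
      simp [pvConsHead, hc]

theorem charEqNat (c d : Char) : (c = d) ↔ c.toNat = d.toNat := by
  constructor
  · rintro rfl; rfl
  · intro h; apply Char.ext; apply UInt32.toNat_inj.mp; exact h

-- on domain characters Python's str.isspace agrees with Source B's six-character whitespace set
theorem isspace_eq_ws (c : Char) (hc : pvDomChar c = true) :
    PySem.Chars.isspace c = pvIsWsB c := by
  simp [pvDomChar] at hc
  rw [Bool.eq_iff_iff]
  simp [PySem.Chars.isspace, pvIsWsB, beq_iff_eq, charEqNat]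
  omega

theorem dropWhile_congr' {p q : Char → Bool} (l : List Char) (h : ∀ c ∈ l, p c = q c) :
    l.dropWhile p = l.dropWhile q := by
  induction l with
  | nil => rfl
  | cons c t ih =>
    have hc := h c (by simp)
    simp only [List.dropWhile_cons, hc]
    split_ifs
    · exact ih (fun c hm => h c (by simp [hm]))
    · rfl

-- generic rstrip over a predicate
theorem rstripP_cons3 (p : Char → Bool) (a b e : Char) (t : List Char) (he : p e = false) :
    ((a :: b :: e :: t).reverse.dropWhile p).reverse = a :: b :: e :: (t.reverse.dropWhile p).reverse := by
  simp only [List.reverse_cons, List.append_assoc]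
  rw [show t.reverse ++ ([e] ++ ([b] ++ [a])) = t.reverse ++ [e, b, a] by simp]
  rw [List.dropWhile_append]
  split_ifs with h1
  · simp only [List.isEmpty_iff] at h1
    rw [h1]
    simp [he]
  · simp

theorem rstripP_prefix (p : Char → Bool) (l : List Char) :
    (l.reverse.dropWhile p).reverse <+: l := by
  have h := List.dropWhile_suffix (l := l.reverse) p
  have := h.reverse
  simpa using this

theorem rstrip_eq_rstripB (l : List Char) (hd : l.all pvDomChar = true) :
    PySem.Chars.rstrip l = pvRstripB l := by
  unfold PySem.Chars.rstrip pvRstripB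
  rw [dropWhile_congr' l.reverse (fun c hm => isspace_eq_ws c (by
    simp only [List.all_eq_true] at hd
    exact hd c (by simpa using hm)))]

theorem lstrip_eq_dropWhileB (l : List Char) (hd : l.all pvDomChar = true) :
    PySem.Chars.lstrip l = l.dropWhile pvIsWsB := by
  unfold PySem.Chars.lstrip
  exact dropWhile_congr' l (fun c hm => isspace_eq_ws c (by
    simp only [List.all_eq_true] at hd
    exact hd c hm))

-- a character whose upper() is 'C', 'N' or '=' is neither whitespace nor a comma
theorem islower_nat (c : Char) (hl : PySem.Chars.islower c = true) :
    97 ≤ c.toNat ∧ c.toNat ≤ 122 := by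
  simp only [PySem.Chars.islower, Bool.and_eq_true, decide_eq_true_eq, Char.le_def,
    UInt32.le_iff_toNat_le, show ('a').val.toNat = 97 from rfl,
    show ('z').val.toNat = 122 from rfl] at hl
  exact hl

theorem upperChar_facts (c u : Char) (hu : PySem.Chars.upperChar c = u)
    (hmem : u = 'C' ∨ u = 'N' ∨ u = '=') :
    PySem.Chars.isspace c = false ∧ pvIsWsB c = false ∧ c ≠ ',' := by
  unfold PySem.Chars.upperChar at hu
  by_cases hl : PySem.Chars.islower c = true
  · have h := islower_nat c hl
    refine ⟨?_, ?_, ?_⟩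
    · simp only [PySem.Chars.isspace, Bool.or_eq_false_iff, Bool.and_eq_false_iff,
        decide_eq_false_iff_not]
      omega
    · simp only [pvIsWsB, Bool.or_eq_false_iff, beq_eq_false_iff_ne, Ne, charEqNat,
        show (' ').toNat = 32 from rfl, show ('\t').toNat = 9 from rfl,
        show ('\n').toNat = 10 from rfl, show ('\r').toNat = 13 from rfl,
        show (Char.ofNat 11).toNat = 11 from rfl, show (Char.ofNat 12).toNat = 12 from rfl]
      omega
    · rw [Ne, charEqNat, show (',').toNat = 44 from rfl]
      omega
  · simp only [hl] at hu
    subst hu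
    rcases hmem with h | h | h <;> subst h <;> exact ⟨by decide, by decide, by decide⟩

-- upper is a map
theorem upper_eq_map (l : List Char) : PySem.Chars.upper l = l.map PySem.Chars.upperChar := rfl

theorem upperChar_comma : PySem.Chars.upperChar ',' = ',' := by decide

theorem takeWhile_append_all {p : Char → Bool} (u v : List Char) (h : ∀ x ∈ u, p x = true) :
    (u ++ v).takeWhile p = u ++ v.takeWhile p := by
  induction u with
  | nil => simp
  | cons a t ih =>
    simp only [List.cons_append, List.takeWhile_cons, h a (by simp)]
    rw [ih (fun x hx => h x (by simp [hx]))]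
    simp

theorem dropWhile_comma_shape (l : List Char) :
    l.dropWhile (fun c => c ≠ ',') = [] ∨ ∃ t, l.dropWhile (fun c => c ≠ ',') = ',' :: t := by
  induction l with
  | nil => simp
  | cons c t ih =>
    by_cases hc : c = ','
    · subst hc; right; exact ⟨t, by simp⟩
    · simpa [List.dropWhile_cons, hc] using ih

theorem scan_nil : extract_common_name_py_scan [] = none := by
  rw [extract_common_name_py_scan]
  decide

theorem main_scan (n : Nat) : ∀ (l : List Char), l.length ≤ n → l.all pvDomChar = true →
    extract_common_name_py_loop (pvSplitC l) = extract_common_name_py_scan l := by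
  induction n with
  | zero =>
    intro l hn _
    have hl : l = [] := by cases l <;> simp_all
    subst hl
    rw [scan_nil]
    decide
  | succ n ih =>
    intro l hn hdom
    rw [pvSplitC_eq l]
    set c0 := l.takeWhile (fun c => c ≠ ',') with hc0
    set d := l.dropWhile (fun c => c ≠ ',') with hdd
    have hld : c0 ++ d = l := List.takeWhile_append_dropWhile
    have hdshape := dropWhile_comma_shape l
    rw [← hdd] at hdshape
    -- domain facts
    have hdomc0 : c0.all pvDomChar = true := by
      simp only [List.all_eq_true] at hdom ⊢
      exact fun c hm => hdom c ((List.takeWhile_sublist _).subset hm)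
    have hdomd : d.all pvDomChar = true := by
      simp only [List.all_eq_true] at hdom ⊢
      exact fun c hm => hdom c ((List.dropWhile_sublist _).subset hm)
    -- the shared else-branch: continue past the next comma
    have helse : extract_common_name_py_loop (pvTail d)
        = if d.isEmpty = true then none else extract_common_name_py_scan d.tail := by
      rcases hdshape with h0 | ⟨t, ht⟩
      · rw [h0]; simp [pvTail, extract_common_name_py_loop]
      · rw [ht]
        simp only [List.isEmpty_cons, List.tail_cons, pvTail, if_false, Bool.false_eq_true]
        apply ih t
        · have : l.length = c0.length + t.length + 1 := by rw [← hld, ht]; simp; omega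
          omega
        · rw [ht] at hdomd; simp only [List.all_cons, Bool.and_eq_true] at hdomd
          exact hdomd.2
    -- w = component with leading whitespace removed
    set w := c0.dropWhile pvIsWsB with hw
    have hstrip : PySem.Chars.strip c0 = PySem.Chars.rstrip w := by
      unfold PySem.Chars.strip
      rw [lstrip_eq_dropWhileB c0 hdomc0]
    -- unfold both programs one step
    simp only [extract_common_name_py_loop]
    rw [extract_common_name_py_scan]
    simp only [dite_eq_ite]
    cases hwc : w with
    | nil =>
      -- the whole component is whitespace: neither side matches
      have hrest : l.dropWhile pvIsWsB = d := by
        rw [← hld, List.dropWhile_append, ← hw, hwc]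
        simp only [List.isEmpty_nil, if_true]
        rcases hdshape with h0 | ⟨t, ht⟩
        · rw [h0]; rfl
        · rw [ht, List.dropWhile_cons, show pvIsWsB ',' = false by decide]
          simp
      have hcondA : PySem.Chars.startswith (PySem.Chars.upper (PySem.Chars.strip c0)) ['C', 'N', '='] = false := by
        rw [hstrip, hwc]
        decide
      have hcondB : ¬ (PySem.Chars.upper ((l.dropWhile pvIsWsB).take 3) = ['C', 'N', '=']) := by
        rw [hrest]
        rcases hdshape with h0 | ⟨t, ht⟩
        · rw [h0]; decide
        · rw [ht]
          intro hcontra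
          simp [upper_eq_map, List.take_succ_cons, upperChar_comma] at hcontra
      simp only [hcondA, Bool.false_eq_true, if_false, if_neg hcondB]
      exact helse
    | cons x w' =>
      have hrest : l.dropWhile pvIsWsB = w ++ d := by
        rw [← hld, List.dropWhile_append, ← hw, hwc]
        simp
      by_cases hshape : ∃ a b e w3, w = a :: b :: e :: w3 ∧ PySem.Chars.upperChar a = 'C'
          ∧ PySem.Chars.upperChar b = 'N' ∧ PySem.Chars.upperChar e = '='
      · -- a CN= tag: both sides return the value
        obtain ⟨a, b, e, w3, hweq, ha, hb, he⟩ := hshape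
        have hfa := upperChar_facts a 'C' ha (by tauto)
        have hfb := upperChar_facts b 'N' hb (by tauto)
        have hfe := upperChar_facts e '=' he (by tauto)
        have hcondB : PySem.Chars.upper ((l.dropWhile pvIsWsB).take 3) = ['C', 'N', '='] := by
          rw [hrest, hweq]
          simp [upper_eq_map, ha, hb, he]
        have hrs : PySem.Chars.rstrip w = a :: b :: e :: PySem.Chars.rstrip w3 := by
          rw [hweq]
          exact rstripP_cons3 PySem.Chars.isspace a b e w3 hfe.1
        have hcondA : PySem.Chars.startswith (PySem.Chars.upper (PySem.Chars.strip c0)) ['C', 'N', '='] = true := by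
          rw [hstrip, hrs]
          rw [PySem.Chars.startswith_iff]
          simp [upper_eq_map, ha, hb, he]
        rw [if_pos hcondA, if_pos hcondB]
        -- values agree
        have hdomw3 : w3.all pvDomChar = true := by
          simp only [List.all_eq_true] at hdomc0 ⊢
          intro c hm
          exact hdomc0 c ((List.dropWhile_sublist pvIsWsB).subset (by rw [← hw, hweq]; simp [hm]))
      
        have hw3q : ∀ x_1 ∈ w3, (fun c => decide (c ≠ ',')) x_1 = true := by
          intro y hy
          simp only [decide_eq_true_eq]
          have hyc : y ∈ c0 := (List.dropWhile_sublist pvIsWsB).subset (by rw [← hw, hweq]; simp [hy])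
          have h2 : (fun c => decide (c ≠ ',')) y = true :=
            List.mem_takeWhile_imp (p := fun c => decide (c ≠ ',')) (l := l) hyc
          simpa using h2
        have hvalB : ((l.dropWhile pvIsWsB).drop 3).takeWhile (fun c => c ≠ ',') = w3 := by
          rw [hrest, hweq]
          simp only [List.cons_append, List.drop_succ_cons, List.drop_zero]
          rw [takeWhile_append_all w3 d hw3q]
          rcases hdshape with h0 | ⟨t, ht⟩
          · rw [h0]; simp
          · rw [ht, List.takeWhile_cons]
            simp
        rw [hvalB, hstrip, hrs]
        rw [← rstrip_eq_rstripB w3 hdomw3]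
        simp only [PySem.Chars.slice_eq_listSlice]
        rw [PySem.List.slice_from _ (a := 3) (by norm_num)]
        rfl
      · -- no CN= tag here: both sides move on
        have hcondB : ¬ (PySem.Chars.upper ((l.dropWhile pvIsWsB).take 3) = ['C', 'N', '=']) := by
          intro hcontra
          rw [hrest] at hcontra
          apply hshape
          match hww : w, hcontra with
          | [], hcontra =>
            rcases hdshape with h0 | ⟨t, ht⟩
            · rw [h0] at hcontra; simp [upper_eq_map] at hcontra
            · rw [ht] at hcontra
              simp [upper_eq_map, List.take_succ_cons, upperChar_comma] at hcontra
          | [x], hcontra =>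
            rcases hdshape with h0 | ⟨t, ht⟩
            · rw [h0] at hcontra; simp [upper_eq_map] at hcontra
            · rw [ht] at hcontra
              simp [upper_eq_map, List.take_succ_cons, upperChar_comma] at hcontra
          | [x, y], hcontra =>
            rcases hdshape with h0 | ⟨t, ht⟩
            · rw [h0] at hcontra; simp [upper_eq_map] at hcontra
            · rw [ht] at hcontra
              simp [upper_eq_map, List.take_succ_cons, upperChar_comma] at hcontra
          | x :: y :: z :: w3, hcontra =>
            simp only [List.cons_append, List.take_succ_cons, List.take_zero,
              upper_eq_map, List.map_cons, List.map_nil, List.cons.injEq, and_true] at hcontra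
            exact ⟨x, y, z, w3, rfl, hcontra.1, hcontra.2.1, hcontra.2.2⟩
        have hcondA : ¬ (PySem.Chars.startswith (PySem.Chars.upper (PySem.Chars.strip c0)) ['C', 'N', '='] = true) := by
          intro hcontra
          rw [hstrip, PySem.Chars.startswith_iff] at hcontra
          obtain ⟨u, hu⟩ := hcontra
          -- rstrip w = a :: b :: e :: t with the right upper-cases
          have hpre := rstripP_prefix PySem.Chars.isspace w
          obtain ⟨v, hv⟩ := hpre
          apply hshape
          match hrw : PySem.Chars.rstrip w, hu, hv with
          | [], hu, hv => simp [upper_eq_map] at hu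
          | [a], hu, hv => simp [upper_eq_map] at hu
          | [a, b], hu, hv => simp [upper_eq_map] at hu
          | a :: b :: e :: t, hu, hv =>
            rw [upper_eq_map] at hu
            simp only [List.map_cons, List.cons_append, List.cons.injEq] at hu
            refine ⟨a, b, e, t ++ v, ?_, hu.1.symm, hu.2.1.symm, hu.2.2.1.symm⟩
            rw [← hv]
            simp [PySem.Chars.rstrip] at hrw ⊢
            rw [hrw]
            simp
        rw [if_neg (by simpa using hcondA), if_neg hcondB]
        exact helse

-- ===== VERDICT (by name: the statement is the Claim_ definition above) =====
theorem extract_common_name_py_spec : Claim_equal_extract_common_name_py := by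
  intro dn hdom
  unfold Spec_extract_common_name_py
  cases dn with
  | none => rfl
  | some s =>
    simp only [extract_common_name_py, extract_common_name_py_alt]
    by_cases hs : s = ""
    · simp [hs]
    · simp only [hs, if_false, splitOn_comma]
      rw [main_scan s.toList.length s.toList le_rfl (by
        simpa [Dom_extract_common_name_py, pvDomStr] using hdom)]
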